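-- pv_equiv track=rewrite | github.com/camillebrl/doc_custom_extraction | annotate_and_display/inference.py | separations_to_regions
-- ===== SOURCE A (Python) =====
-- def separations_to_regions(separations, size):
--     """Convertit les séparations en régions.
--
--     Args:
--         separations: Liste de séparations [début, fin]
--         size: Taille totale (largeur ou hauteur)
--
--     Returns:
--         Liste de régions [début, fin]
--     """
--     regions = []
--
--     # Cas particulier: aucune séparation
--     if len(separations) == 0:
--         regions.append([0, size])
--         return regions
--
--     # Premier bloc si nécessaire
--     if separations[0][0] > 0:
--         regions.append([0, separations[0][0]])
--
--     # Blocs intermédiaires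
--     for i in range(len(separations) - 1):
--         regions.append([separations[i][1], separations[i + 1][0]])
--
--     # Dernier bloc si nécessaire
--     if separations[-1][1] < size:
--         regions.append([separations[-1][1], size])
--
--     return regions
-- ===== SOURCE B (Python) =====
-- def _gaps_after(prev, rest, size):
--     """Gaps strictly after separation `prev`, given the remaining separations."""
--     if not rest:
--         return [[prev[1], size]] if prev[1] < size else []
--     nxt = rest[0]
--     return [[prev[1], nxt[0]]] + _gaps_after(nxt, rest[1:], size)
--
--
-- def separations_to_regions(separations, size):
--     """Convertit les separations en regions (recursive decomposition)."""
--     if not separations: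
--         return [[0, size]]
--     first = separations[0]
--     prefix = [[0, first[0]]] if first[0] > 0 else []
--     return prefix + _gaps_after(first, separations[1:], size)
-- ===== Notes on version B (the rewrite author's own statement) =====
-- stated objective: alternative
-- what changed: A builds the result imperatively in three staged phases (conditional leading block, an index loop over range(len-1) reading separations[i]/separations[i+1], conditional trailing block via separations[-1]); B is a structural recursion that carries the previous separation as state, consuming the list head by head and deciding the trailing block at the base case, with no indexing at all.
import Mathlib
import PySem

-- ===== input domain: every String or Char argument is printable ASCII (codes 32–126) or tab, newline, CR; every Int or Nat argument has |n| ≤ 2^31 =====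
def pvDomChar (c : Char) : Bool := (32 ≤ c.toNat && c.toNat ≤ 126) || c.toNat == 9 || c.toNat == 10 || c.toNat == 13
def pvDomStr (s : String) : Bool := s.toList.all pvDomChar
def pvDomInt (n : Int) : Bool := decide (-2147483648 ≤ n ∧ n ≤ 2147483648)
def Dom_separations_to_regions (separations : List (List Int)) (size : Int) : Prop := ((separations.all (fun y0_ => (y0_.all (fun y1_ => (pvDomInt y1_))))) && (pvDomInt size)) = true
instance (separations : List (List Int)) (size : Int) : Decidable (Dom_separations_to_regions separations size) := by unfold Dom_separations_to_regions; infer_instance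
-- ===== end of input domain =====

-- B replaces A's three staged indexed phases by a structural recursion carrying the previous
-- separation as state (no indexing); objective: alternative, same cost.

-- shared indexing helper: xs[i] with the IndexError case defaulted (Pre_ keeps it unreachable)
def pvGetSep (s : List (List Int)) (i : Int) : List Int := (PySem.List.pyGet? s i).getD []
def pvGetC (l : List Int) (i : Int) : Int := (PySem.List.pyGet? l i).getD 0

-- ===== PORT A =====
def separations_to_regions (separations : List (List Int)) (size : Int) : List (List Int) :=
  if separations.length = 0 then [[0, size]]
  else
    let regions : List (List Int) :=
      if pvGetC (pvGetSep separations 0) 0 > 0 then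
        [[0, pvGetC (pvGetSep separations 0) 0]]
      else []
    let regions :=
      (PySem.List.pyRange 0 ((separations.length : Int) - 1) 1).foldl
        (fun acc i =>
          acc ++ [[pvGetC (pvGetSep separations i) 1, pvGetC (pvGetSep separations (i + 1)) 0]])
        regions
    if pvGetC (pvGetSep separations (-1)) 1 < size then
      regions ++ [[pvGetC (pvGetSep separations (-1)) 1, size]]
    else regions

-- ===== PORT B =====
def pvGapsAfter (prev : List Int) (rest : List (List Int)) (size : Int) : List (List Int) :=
  match rest with
  | [] => if pvGetC prev 1 < size then [[pvGetC prev 1, size]] else []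
  | nxt :: t => [pvGetC prev 1, pvGetC nxt 0] :: pvGapsAfter nxt t size

def separations_to_regions_alt (separations : List (List Int)) (size : Int) : List (List Int) :=
  match separations with
  | [] => [[0, size]]
  | first :: rest =>
    (if pvGetC first 0 > 0 then [[0, pvGetC first 0]] else []) ++ pvGapsAfter first rest size

-- ===== PRECONDITION & SPEC =====
-- Pre_ excludes exactly the inputs on which A raises IndexError: a separation with fewer
-- than two coordinates (A reads sep[0] and sep[1] of every separation it is given).
def Pre_separations_to_regions (separations : List (List Int)) (size : Int) : Prop :=
  ∀ s ∈ separations, 2 ≤ s.length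
instance (separations : List (List Int)) (size : Int) : Decidable (Pre_separations_to_regions separations size) := by unfold Pre_separations_to_regions; infer_instance

def pvWitness_separations_to_regions : List (List Int) × Int := ([[1, 3], [5, 6]], 10)

def Spec_separations_to_regions (separations : List (List Int)) (size : Int) (out : List (List Int)) : Prop := out = separations_to_regions_alt separations size
instance (separations : List (List Int)) (size : Int) (out : List (List Int)) : Decidable (Spec_separations_to_regions separations size out) := by unfold Spec_separations_to_regions; infer_instance

-- ===== CLAIM (what is proved, stated in full; the proofs are below) =====
def Claim_equal_separations_to_regions : Prop := ∀ (separations : List (List Int)) (size : Int), Dom_separations_to_regions separations size → Pre_separations_to_regions separations size → Spec_separations_to_regions separations size (separations_to_regions separations size)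

-- ===== LEMMAS AND PROOFS =====

def pvMid : List Int → List (List Int) → List (List Int)
  | _, [] => []
  | p, q :: t => [pvGetC p 1, pvGetC q 0] :: pvMid q t

theorem pvGetSep_cons_of_nonneg (x : List Int) (xs : List (List Int)) (i : Int) (h : 0 ≤ i) :
    pvGetSep (x :: xs) (i + 1) = pvGetSep xs i := by
  unfold pvGetSep
  rw [PySem.List.pyGet?_of_nonneg (x :: xs) (show (0:Int) ≤ i + 1 by omega), PySem.List.pyGet?_of_nonneg xs h]
  rw [show (i + 1).toNat = i.toNat + 1 by omega]
  rfl

theorem pvRangeMap_eq_mid (p : List Int) (t : List (List Int)) :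
    (PySem.List.pyRange 0 ((t.length : Int)) 1).map
      (fun i => ([pvGetC (pvGetSep (p :: t) i) 1, pvGetC (pvGetSep (p :: t) (i + 1)) 0] : List Int))
      = pvMid p t := by
  induction t generalizing p with
  | nil => simp [PySem.List.pyRange, pvMid]
  | cons q t ih =>
    rw [PySem.List.pyRange_zero_natCast]
    simp only [List.length_cons, List.range_succ_eq_map, List.map_cons, List.map_map]
    have h0 : pvGetSep (p :: q :: t) ((0 : Nat) : Int) = p := by
      simp [pvGetSep]
    have h1 : pvGetSep (p :: q :: t) (((0 : Nat) : Int) + 1) = q := by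
      rw [pvGetSep_cons_of_nonneg _ _ _ (by omega)]
      simp [pvGetSep]
    rw [h0, h1]
    have htail : ∀ k ∈ List.range t.length,
        (((fun i => ([pvGetC (pvGetSep (p :: q :: t) i) 1, pvGetC (pvGetSep (p :: q :: t) (i + 1)) 0] : List Int)) ∘
          (fun k : Nat => (k : Int)) ∘ Nat.succ) k)
        = ((fun i => ([pvGetC (pvGetSep (q :: t) i) 1, pvGetC (pvGetSep (q :: t) (i + 1)) 0] : List Int)) ∘
          (fun k : Nat => (k : Int))) k := by
      intro k _
      simp only [Function.comp]
      rw [show ((Nat.succ k : Nat) : Int) = ((k : Int) + 1) by push_cast; ring]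
      rw [pvGetSep_cons_of_nonneg _ _ _ (by omega),
          show ((k : Int) + 1 + 1) = ((k : Int) + 1) + 1 by ring,
          pvGetSep_cons_of_nonneg _ _ _ (by omega)]
    rw [List.map_congr_left htail]
    have hih := ih q
    rw [PySem.List.pyRange_zero_natCast] at hih
    rw [List.map_map] at hih
    rw [hih, pvMid]

def pvLast (seps : List (List Int)) : List Int := seps.getLast?.getD []

theorem pvGetSep_neg_one (seps : List (List Int)) :
    pvGetSep seps (-1) = pvLast seps := by
  simp [pvGetSep, pvLast, PySem.List.pyGet?_neg_one]

theorem pvLast_cons_cons (p q : List Int) (t : List (List Int)) :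
    pvLast (p :: q :: t) = pvLast (q :: t) := by
  simp [pvLast]

theorem A_char (p : List Int) (t : List (List Int)) (size : Int) :
    separations_to_regions (p :: t) size =
      (if pvGetC p 0 > 0 then [[0, pvGetC p 0]] else []) ++ pvMid p t
        ++ (if pvGetC (pvLast (p :: t)) 1 < size then [[pvGetC (pvLast (p :: t)) 1, size]] else []) := by
  unfold separations_to_regions
  rw [if_neg (by simp)]
  simp only [List.length_cons]
  rw [PySem.List.foldl_append_singleton_eq_map
    (fun i => ([pvGetC (pvGetSep (p :: t) i) 1, pvGetC (pvGetSep (p :: t) (i + 1)) 0] : List Int))]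
  rw [show ((t.length + 1 : Nat) : Int) - 1 = ((t.length : Nat) : Int) by push_cast; ring]
  rw [pvRangeMap_eq_mid p t]
  have h0 : pvGetSep (p :: t) 0 = p := by simp [pvGetSep]
  rw [pvGetSep_neg_one, h0]
  split_ifs <;> simp

theorem gapsAfter_char (p : List Int) (t : List (List Int)) (size : Int) :
    pvGapsAfter p t size =
      pvMid p t ++ (if pvGetC (pvLast (p :: t)) 1 < size then [[pvGetC (pvLast (p :: t)) 1, size]] else []) := by
  induction t generalizing p with
  | nil => simp [pvGapsAfter, pvMid, pvLast]
  | cons q t ih =>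
    rw [pvLast_cons_cons]
    simp only [pvGapsAfter, pvMid, List.cons_append]
    rw [ih q]

-- ===== VERDICT (by name: the statement is the Claim_ definition above) =====
theorem separations_to_regions_spec : Claim_equal_separations_to_regions := by
  intro separations size _hdom _hpre
  unfold Spec_separations_to_regions
  cases separations with
  | nil => rfl
  | cons p t =>
    rw [A_char, separations_to_regions_alt, gapsAfter_char]
    simp
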